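-- pv_equiv track=rewrite | github.com/rimiktech/analysis | task/ex.py | maxSumSubarrayRemovingOneEle
-- ===== SOURCE A (Python) =====
-- def maxSumSubarrayRemovingOneEle(arr, n):
--
-- 	fw = [0 for k in range(n)]
-- 	bw = [0 for k in range(n)]
--
-- 	cur_max, max_so_far = arr[0], arr[0]
-- 	fw[0] = cur_max
--
-- 	for i in range(1,n):
-- 		cur_max = max(arr[i], cur_max + arr[i])
-- 		max_so_far = max(max_so_far, cur_max)
--
--
-- 		fw[i] = cur_max
--
--
-- 	cur_max = max_so_far = bw[n-1] = arr[n-1]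
-- 	i = n-2
-- 	while i >= 0:
-- 		cur_max = max(arr[i], cur_max + arr[i])
-- 		max_so_far = max(max_so_far, cur_max)
--
--
-- 		bw[i] = cur_max
-- 		i -= 1
--
--
-- 	fans = max_so_far
--
--
-- 	for i in range(1,n-1):
-- 		fans = max(fans, fw[i - 1] + bw[i + 1])
--
-- 	return fans
-- ===== SOURCE B (Python) =====
-- def maxSumSubarrayRemovingOneEle(arr, n):
-- 	# One pass, O(1) extra space: noDel = best subarray ending here with no
-- 	# deletion, withDel = best ending here with exactly one element deleted.
-- 	noDel = ans = arr[0]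
-- 	withDel = None
-- 	for i in range(1, n):
-- 		x = arr[i]
-- 		withDel = noDel if withDel is None else max(noDel, withDel + x)
-- 		noDel = max(x, noDel + x)
-- 		ans = max(ans, noDel, withDel)
-- 	return ans
-- ===== Notes on version B (the rewrite author's own statement) =====
-- stated objective: simpler
-- what changed: Replaces the two precomputed Kadane arrays (forward fw and backward bw) plus the separate combine pass with a single left-to-right loop maintaining two scalars: best subarray sum ending here with no deletion and with exactly one deletion, in O(1) extra space.
import Mathlib
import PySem

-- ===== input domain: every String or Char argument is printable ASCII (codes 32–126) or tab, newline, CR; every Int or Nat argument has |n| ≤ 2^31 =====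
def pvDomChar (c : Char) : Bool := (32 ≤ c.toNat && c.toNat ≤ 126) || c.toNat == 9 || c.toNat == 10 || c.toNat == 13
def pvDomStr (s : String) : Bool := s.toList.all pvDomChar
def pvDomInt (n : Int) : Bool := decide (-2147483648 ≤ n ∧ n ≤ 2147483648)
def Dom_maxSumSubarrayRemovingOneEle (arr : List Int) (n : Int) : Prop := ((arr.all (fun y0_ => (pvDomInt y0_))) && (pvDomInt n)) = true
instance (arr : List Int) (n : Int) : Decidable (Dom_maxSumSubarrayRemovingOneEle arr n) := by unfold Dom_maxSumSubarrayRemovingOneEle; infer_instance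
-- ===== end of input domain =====

-- B replaces A's two precomputed Kadane arrays (fw, bw) and separate combine pass by a single
-- left-to-right loop keeping two scalars (best sum ending here without / with one deletion): simpler, O(1) space.


-- ===== PORT A =====
def maxSumSubarrayRemovingOneEle (arr : List Int) (n : Int) : Int :=
  -- fw = [0 for k in range(n)]; bw = [0 for k in range(n)]
  let fw : List Int := (PySem.List.pyRange 0 n 1).map (fun _ => (0 : Int))
  let bw : List Int := (PySem.List.pyRange 0 n 1).map (fun _ => (0 : Int))
  -- cur_max, max_so_far = arr[0], arr[0]; fw[0] = cur_max
  let a0 := PySem.List.pyGetD arr 0 0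
  let fw := PySem.List.pySetD fw 0 a0
  -- for i in range(1, n): ...
  let s1 := (PySem.List.pyRange 1 n 1).foldl
    (fun (s : Int × Int × List Int) i =>
      let x := PySem.List.pyGetD arr i 0
      let cur := max x (s.1 + x)
      (cur, max s.2.1 cur, PySem.List.pySetD s.2.2 i cur))
    (a0, a0, fw)
  let fw := s1.2.2
  -- cur_max = max_so_far = bw[n-1] = arr[n-1]
  let an := PySem.List.pyGetD arr (n - 1) 0
  let bw := PySem.List.pySetD bw (n - 1) an
  -- while i >= 0 with i = n-2, n-3, ..., 0
  let s2 := (PySem.List.pyRange (n - 2) (-1) (-1)).foldl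
    (fun (s : Int × Int × List Int) i =>
      let x := PySem.List.pyGetD arr i 0
      let cur := max x (s.1 + x)
      (cur, max s.2.1 cur, PySem.List.pySetD s.2.2 i cur))
    (an, an, bw)
  let bw := s2.2.2
  -- fans = max_so_far; for i in range(1, n-1): fans = max(fans, fw[i-1] + bw[i+1])
  (PySem.List.pyRange 1 (n - 1) 1).foldl
    (fun fans i => max fans (PySem.List.pyGetD fw (i - 1) 0 + PySem.List.pyGetD bw (i + 1) 0))
    s2.2.1

-- ===== PORT B =====
def maxSumSubarrayRemovingOneEle_alt (arr : List Int) (n : Int) : Int :=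
  let a0 := PySem.List.pyGetD arr 0 0
  let s := (PySem.List.pyRange 1 n 1).foldl
    (fun (s : Int × Option Int × Int) i =>
      let x := PySem.List.pyGetD arr i 0
      let wd := match s.2.1 with
        | none => s.1
        | some w => max s.1 (w + x)
      let nd := max x (s.1 + x)
      (nd, some wd, max (max s.2.2 nd) wd))
    (a0, none, a0)
  s.2.2

-- ===== PRECONDITION & SPEC =====
-- Pre_ excludes exactly the inputs on which the Python A raises IndexError: n < 1 (fw[0] = ... or arr[0]
-- fails) or n > len(arr) (arr[i] out of range). A returns normally iff 1 ≤ n ≤ len(arr).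
def Pre_maxSumSubarrayRemovingOneEle (arr : List Int) (n : Int) : Prop :=
  1 ≤ n ∧ n ≤ arr.length
instance (arr : List Int) (n : Int) : Decidable (Pre_maxSumSubarrayRemovingOneEle arr n) := by
  unfold Pre_maxSumSubarrayRemovingOneEle; infer_instance
def pvWitness_maxSumSubarrayRemovingOneEle : List Int × Int := ([1, -2, 3, 4], 4)

def Spec_maxSumSubarrayRemovingOneEle (arr : List Int) (n : Int) (out : Int) : Prop := out = maxSumSubarrayRemovingOneEle_alt arr n
instance (arr : List Int) (n : Int) (out : Int) : Decidable (Spec_maxSumSubarrayRemovingOneEle arr n out) := by unfold Spec_maxSumSubarrayRemovingOneEle; infer_instance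

-- ===== CLAIM (what is proved, stated in full; the proofs are below) =====
def Claim_equal_maxSumSubarrayRemovingOneEle : Prop := ∀ (arr : List Int) (n : Int), Dom_maxSumSubarrayRemovingOneEle arr n → Pre_maxSumSubarrayRemovingOneEle arr n → Spec_maxSumSubarrayRemovingOneEle arr n (maxSumSubarrayRemovingOneEle arr n)

-- ===== LEMMAS AND PROOFS =====

-- a k = arr[k] (in-range reads only, under Pre_)
def pvA (arr : List Int) (k : Nat) : Int := arr.getD k 0
-- S l r = sum of arr[l..r] (0 if l > r)
def pvS (arr : List Int) (l r : Nat) : Int := ∑ k ∈ Finset.Icc l r, pvA arr k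
-- E i = best sum of a subarray ending exactly at i (A's fw[i], Kadane)
def pvE (arr : List Int) : Nat → Int
  | 0 => pvA arr 0
  | i+1 => max (pvA arr (i+1)) (pvE arr i + pvA arr (i+1))
-- F i = max_{r ≤ i} E r (A's forward max_so_far)
def pvF (arr : List Int) : Nat → Int
  | 0 => pvA arr 0
  | i+1 => max (pvF arr i) (pvE arr (i+1))
-- Bd j = A's bw[md - j] (best sum of a subarray starting exactly at md - j), md = n-1
def pvBd (arr : List Int) (md : Nat) : Nat → Int
  | 0 => pvA arr md
  | j+1 => max (pvA arr (md - (j+1))) (pvBd arr md j + pvA arr (md - (j+1)))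
-- Gd j = backward max_so_far after j steps
def pvGd (arr : List Int) (md : Nat) : Nat → Int
  | 0 => pvA arr md
  | j+1 => max (pvGd arr md j) (pvBd arr md (j+1))
-- W i = B's withDel after step i (best sum ending at i with exactly one deletion); W 0 is a dummy
def pvW (arr : List Int) : Nat → Int
  | 0 => pvA arr 0
  | 1 => pvE arr 0
  | p+2 => max (pvE arr (p+1)) (pvW arr (p+1) + pvA arr (p+2))
-- Ans i = B's running answer after step i
def pvAns (arr : List Int) : Nat → Int
  | 0 => pvA arr 0
  | i+1 => max (max (pvAns arr i) (pvE arr (i+1))) (pvW arr (i+1))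
-- Cf t = A's fans after combine steps i = 1..t (seeded with the backward max_so_far)
def pvCf (arr : List Int) (md : Nat) : Nat → Int
  | 0 => pvGd arr md md
  | t+1 => max (pvCf arr md t) (pvE arr t + pvBd arr md (md - (t+2)))

-- characterisations ---------------------------------------------------------
theorem pvS_self (arr : List Int) (a : Nat) : pvS arr a a = pvA arr a := by simp [pvS]

theorem pvS_empty (arr : List Int) (a b : Nat) (h : b < a) : pvS arr a b = 0 := by
  unfold pvS; rw [Finset.Icc_eq_empty (by omega)]; simp

theorem pvS_top (arr : List Int) (a b : Nat) (h : a ≤ b + 1) :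
    pvS arr a (b + 1) = pvS arr a b + pvA arr (b + 1) :=
  Finset.sum_Icc_succ_top h _

theorem pvS_bot (arr : List Int) (a b : Nat) (h : a ≤ b) :
    pvS arr a b = pvA arr a + pvS arr (a + 1) b := by
  unfold pvS
  rw [show Finset.Icc a b = insert a (Finset.Icc (a+1) b) by
        ext x; simp [Finset.mem_Icc, Finset.mem_insert]; omega,
      Finset.sum_insert (by simp)]

theorem pvE_ub (arr : List Int) (l i : Nat) (h : l ≤ i) : pvS arr l i ≤ pvE arr i := by
  induction i with
  | zero =>
    have hl : l = 0 := by omega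
    subst hl; simp [pvE, pvS_self]
  | succ i ih =>
    rcases Nat.eq_or_lt_of_le h with he | hlt
    · rw [he, pvS_self]; exact le_max_left _ _
    · have hl : l ≤ i := by omega
      rw [pvS_top arr l i (by omega)]
      calc pvS arr l i + pvA arr (i+1) ≤ pvE arr i + pvA arr (i+1) := by
            exact add_le_add_left (ih hl) _
        _ ≤ pvE arr (i+1) := le_max_right _ _

theorem pvE_mem (arr : List Int) (i : Nat) : ∃ l, l ≤ i ∧ pvE arr i = pvS arr l i := by
  induction i with
  | zero => exact ⟨0, le_refl _, by simp [pvE, pvS_self]⟩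
  | succ i ih =>
    obtain ⟨l, hl, he⟩ := ih
    rcases max_cases (pvA arr (i+1)) (pvE arr i + pvA arr (i+1)) with ⟨h1, _⟩ | ⟨h1, _⟩
    · exact ⟨i+1, le_refl _, by rw [show pvE arr (i+1) = _ from h1, pvS_self]⟩
    · refine ⟨l, by omega, ?_⟩
      rw [show pvE arr (i+1) = _ from h1, he, pvS_top arr l i (by omega)]

theorem pvE_le_F (arr : List Int) (i : Nat) : pvE arr i ≤ pvF arr i := by
  cases i with
  | zero => simp [pvE, pvF]
  | succ i => exact le_max_right _ _

theorem pvF_mono (arr : List Int) (i j : Nat) (h : i ≤ j) : pvF arr i ≤ pvF arr j := by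
  induction j with
  | zero => have : i = 0 := by omega
            subst this; exact le_refl _
  | succ j ih =>
    rcases Nat.eq_or_lt_of_le h with he | hlt
    · rw [he]
    · exact le_trans (ih (by omega)) (le_max_left _ _)

theorem pvF_ub (arr : List Int) (l r i : Nat) (h1 : l ≤ r) (h2 : r ≤ i) : pvS arr l r ≤ pvF arr i :=
  le_trans (pvE_ub arr l r h1) (le_trans (pvE_le_F arr r) (pvF_mono arr r i h2))

theorem pvF_mem (arr : List Int) (i : Nat) : ∃ l r, l ≤ r ∧ r ≤ i ∧ pvF arr i = pvS arr l r := by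
  induction i with
  | zero => exact ⟨0, 0, le_refl _, le_refl _, by simp [pvF, pvS_self]⟩
  | succ i ih =>
    obtain ⟨l, r, hlr, hri, he⟩ := ih
    rcases max_cases (pvF arr i) (pvE arr (i+1)) with ⟨h1, _⟩ | ⟨h1, _⟩
    · exact ⟨l, r, hlr, by omega, by rw [show pvF arr (i+1) = _ from h1, he]⟩
    · obtain ⟨l', hl', he'⟩ := pvE_mem arr (i+1)
      exact ⟨l', i+1, hl', le_refl _, by rw [show pvF arr (i+1) = _ from h1, he']⟩

theorem pvBd_ub (arr : List Int) (md j r : Nat) (hj : j ≤ md) (h1 : md - j ≤ r) (h2 : r ≤ md) :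
    pvS arr (md - j) r ≤ pvBd arr md j := by
  induction j with
  | zero =>
    have hr : r = md := by omega
    subst hr; simp [pvBd, pvS_self]
  | succ j ih =>
    rcases Nat.eq_or_lt_of_le h1 with he | hlt
    · rw [← he, pvS_self]; exact le_max_left _ _
    · rw [pvS_bot arr (md - (j+1)) r (by omega),
          show md - (j+1) + 1 = md - j by omega]
      calc pvA arr (md - (j+1)) + pvS arr (md - j) r
          ≤ pvA arr (md - (j+1)) + pvBd arr md j := by
            exact add_le_add_right (ih (by omega) (by omega)) _
        _ = pvBd arr md j + pvA arr (md - (j+1)) := by ring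
        _ ≤ pvBd arr md (j+1) := le_max_right _ _

theorem pvBd_mem (arr : List Int) (md j : Nat) (hj : j ≤ md) :
    ∃ r, md - j ≤ r ∧ r ≤ md ∧ pvBd arr md j = pvS arr (md - j) r := by
  induction j with
  | zero => exact ⟨md, by omega, le_refl _, by simp [pvBd, pvS_self]⟩
  | succ j ih =>
    obtain ⟨r, hr1, hr2, he⟩ := ih (by omega)
    rcases max_cases (pvA arr (md - (j+1))) (pvBd arr md j + pvA arr (md - (j+1))) with ⟨h1, _⟩ | ⟨h1, _⟩
    · exact ⟨md - (j+1), le_refl _, by omega, by rw [show pvBd arr md (j+1) = _ from h1, pvS_self]⟩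
    · refine ⟨r, by omega, hr2, ?_⟩
      rw [show pvBd arr md (j+1) = _ from h1, he,
          pvS_bot arr (md - (j+1)) r (by omega), show md - (j+1) + 1 = md - j by omega]
      ring

theorem pvBd_le_Gd (arr : List Int) (md j : Nat) : pvBd arr md j ≤ pvGd arr md j := by
  cases j with
  | zero => simp [pvBd, pvGd]
  | succ j => exact le_max_right _ _

theorem pvGd_mono (arr : List Int) (md i j : Nat) (h : i ≤ j) : pvGd arr md i ≤ pvGd arr md j := by
  induction j with
  | zero => have : i = 0 := by omega
            subst this; exact le_refl _
  | succ j ih =>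
    rcases Nat.eq_or_lt_of_le h with he | hlt
    · rw [he]
    · exact le_trans (ih (by omega)) (le_max_left _ _)

theorem pvGd_ub (arr : List Int) (md l r : Nat) (h1 : l ≤ r) (h2 : r ≤ md) :
    pvS arr l r ≤ pvGd arr md md := by
  have hl : l ≤ md := by omega
  have h3 : pvS arr l r ≤ pvBd arr md (md - l) := by
    have := pvBd_ub arr md (md - l) r (by omega) (by omega) h2
    rwa [show md - (md - l) = l by omega] at this
  exact le_trans h3 (le_trans (pvBd_le_Gd arr md (md - l)) (pvGd_mono arr md (md - l) md (by omega)))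

theorem pvGd_mem (arr : List Int) (md j : Nat) (hj : j ≤ md) :
    ∃ l r, md - j ≤ l ∧ l ≤ r ∧ r ≤ md ∧ pvGd arr md j = pvS arr l r := by
  induction j with
  | zero => exact ⟨md, md, by omega, le_refl _, le_refl _, by simp [pvGd, pvS_self]⟩
  | succ j ih =>
    obtain ⟨l, r, hl, hlr, hr, he⟩ := ih (by omega)
    rcases max_cases (pvGd arr md j) (pvBd arr md (j+1)) with ⟨h1, _⟩ | ⟨h1, _⟩
    · exact ⟨l, r, by omega, hlr, hr, by rw [show pvGd arr md (j+1) = _ from h1, he]⟩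
    · obtain ⟨r', hr1, hr2, he'⟩ := pvBd_mem arr md (j+1) hj
      exact ⟨md - (j+1), r', le_refl _, hr1, hr2, by rw [show pvGd arr md (j+1) = _ from h1, he']⟩

-- backward max_so_far = forward max_so_far (both are the max subarray sum over [0, md])
theorem pvGd_eq_F (arr : List Int) (md : Nat) : pvGd arr md md = pvF arr md := by
  apply le_antisymm
  · obtain ⟨l, r, _, hlr, hr, he⟩ := pvGd_mem arr md md (le_refl _)
    rw [he]; exact pvF_ub arr l r md hlr hr
  · obtain ⟨l, r, hlr, hr, he⟩ := pvF_mem arr md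
    rw [he]; exact pvGd_ub arr md l r hlr hr

theorem pvW_ub (arr : List Int) (j i : Nat) (h1 : 1 ≤ j) (h2 : j ≤ i) :
    pvE arr (j - 1) + pvS arr (j + 1) i ≤ pvW arr i := by
  induction i with
  | zero => omega
  | succ i ih =>
    cases i with
    | zero =>
      have hj : j = 1 := by omega
      subst hj
      simp [pvW, pvS_empty arr 2 1 (by omega)]
    | succ p =>
      rcases Nat.eq_or_lt_of_le h2 with he | hlt
      · subst he
        simp only [pvW, pvS_empty arr (p+2+1) (p+2) (by omega), add_zero,
          show p + 2 - 1 = p + 1 from rfl]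
        exact le_max_left _ _
      · have hji : j ≤ p + 1 := by omega
        rw [pvS_top arr (j+1) (p+1) (by omega), ← add_assoc]
        calc pvE arr (j-1) + pvS arr (j+1) (p+1) + pvA arr (p+2)
            ≤ pvW arr (p+1) + pvA arr (p+2) := add_le_add_left (ih hji) _
          _ ≤ pvW arr (p+2) := le_max_right _ _

theorem pvW_mem (arr : List Int) (i : Nat) (hi : 1 ≤ i) :
    ∃ j, 1 ≤ j ∧ j ≤ i ∧ pvW arr i = pvE arr (j - 1) + pvS arr (j + 1) i := by
  induction i with
  | zero => omega
  | succ i ih =>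
    cases i with
    | zero =>
      exact ⟨1, le_refl _, le_refl _, by simp [pvW, pvS_empty arr 2 1 (by omega)]⟩
    | succ p =>
      obtain ⟨j, hj1, hj2, he⟩ := ih (by omega)
      rcases max_cases (pvE arr (p+1)) (pvW arr (p+1) + pvA arr (p+2)) with ⟨h1, _⟩ | ⟨h1, _⟩
      · refine ⟨p+2, by omega, le_refl _, ?_⟩
        rw [show pvW arr (p+2) = _ from h1, pvS_empty arr (p+2+1) (p+2) (by omega)]
        simp
      · refine ⟨j, hj1, by omega, ?_⟩
        rw [show pvW arr (p+2) = _ from h1, he, pvS_top arr (j+1) (p+1) (by omega), ← add_assoc]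

theorem pvAns_ge_F (arr : List Int) (i : Nat) : pvF arr i ≤ pvAns arr i := by
  induction i with
  | zero => simp [pvF, pvAns]
  | succ i ih =>
    refine le_trans (max_le_max ih (le_refl _)) ?_
    exact le_trans (le_max_left _ _) (le_refl _)

theorem pvAns_mono (arr : List Int) (i j : Nat) (h : i ≤ j) : pvAns arr i ≤ pvAns arr j := by
  induction j with
  | zero => have : i = 0 := by omega
            subst this; exact le_refl _
  | succ j ih =>
    rcases Nat.eq_or_lt_of_le h with he | hlt
    · rw [he]
    · exact le_trans (ih (by omega)) (le_trans (le_max_left _ _) (le_max_left _ _))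

theorem pvAns_ge_W (arr : List Int) (j i : Nat) (h1 : 1 ≤ j) (h2 : j ≤ i) :
    pvW arr j ≤ pvAns arr i := by
  have hj : pvW arr j ≤ pvAns arr j := by
    cases j with
    | zero => omega
    | succ p => exact le_max_right _ _
  exact le_trans hj (pvAns_mono arr j i h2)

theorem pvAns_le (arr : List Int) (i : Nat) (x : Int) (hF : pvF arr i ≤ x)
    (hW : ∀ j, 1 ≤ j → j ≤ i → pvW arr j ≤ x) : pvAns arr i ≤ x := by
  induction i with
  | zero => simpa [pvAns, pvF] using hF
  | succ i ih =>
    refine max_le (max_le ?_ ?_) (hW (i+1) (by omega) (le_refl _))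
    · exact ih (le_trans (pvF_mono arr i (i+1) (by omega)) hF)
        (fun j hj1 hj2 => hW j hj1 (by omega))
    · exact le_trans (pvE_le_F arr (i+1)) hF

theorem pvCf_ge_Gd (arr : List Int) (md t : Nat) : pvGd arr md md ≤ pvCf arr md t := by
  induction t with
  | zero => exact le_refl _
  | succ t ih => exact le_trans ih (le_max_left _ _)

theorem pvCf_ge_term (arr : List Int) (md t s : Nat) (h1 : 1 ≤ s) (h2 : s ≤ t) :
    pvE arr (s - 1) + pvBd arr md (md - (s + 1)) ≤ pvCf arr md t := by
  induction t with
  | zero => omega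
  | succ t ih =>
    rcases Nat.eq_or_lt_of_le h2 with he | hlt
    · subst he
      have : pvE arr (t + 1 - 1) + pvBd arr md (md - (t + 1 + 1)) =
          pvE arr t + pvBd arr md (md - (t + 2)) := by norm_num
      rw [this]
      exact le_max_right _ _
    · exact le_trans (ih (by omega)) (le_max_left _ _)

theorem pvCf_le (arr : List Int) (md t : Nat) (x : Int) (hG : pvGd arr md md ≤ x)
    (hT : ∀ s, 1 ≤ s → s ≤ t → pvE arr (s - 1) + pvBd arr md (md - (s + 1)) ≤ x) :
    pvCf arr md t ≤ x := by
  induction t with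
  | zero => exact hG
  | succ t ih =>
    refine max_le (ih (fun s hs1 hs2 => hT s hs1 (by omega))) ?_
    have := hT (t+1) (by omega) (le_refl _)
    simpa using this

-- main mathematical identity: A's final fans equals B's final ans
theorem pvCf_eq_Ans (arr : List Int) (m : Nat) (hm : 1 ≤ m) :
    pvCf arr (m - 1) (m - 2) = pvAns arr (m - 1) := by
  apply le_antisymm
  · -- A's fans ≤ B's ans
    apply pvCf_le
    · rw [pvGd_eq_F]; exact pvAns_ge_F arr (m-1)
    · intro s hs1 hs2
      have hsm : s + 1 ≤ m - 1 := by omega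
      obtain ⟨r, hr1, hr2, he⟩ := pvBd_mem arr (m-1) ((m-1) - (s+1)) (by omega)
      rw [show m - 1 - (m - 1 - (s+1)) = s + 1 by omega] at he
      rw [he]
      exact le_trans (pvW_ub arr s r hs1 (by omega)) (pvAns_ge_W arr r (m-1) (by omega) hr2)
  · -- B's ans ≤ A's fans
    apply pvAns_le
    · rw [← pvGd_eq_F]; exact pvCf_ge_Gd arr (m-1) (m-2)
    · intro j hj1 hj2
      obtain ⟨l, hl1, hl2, he⟩ := pvW_mem arr j hj1
      rcases Nat.eq_or_lt_of_le hl2 with heq | hlt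
      · -- deletion at the end of the subarray: dominated by the plain max subarray sum
        subst heq
        rw [he, pvS_empty arr (l+1) l (by omega), add_zero]
        calc pvE arr (l-1) ≤ pvF arr (m-1) :=
              le_trans (pvE_le_F arr (l-1)) (pvF_mono arr (l-1) (m-1) (by omega))
          _ = pvGd arr (m-1) (m-1) := (pvGd_eq_F arr (m-1)).symm
          _ ≤ pvCf arr (m-1) (m-2) := pvCf_ge_Gd arr (m-1) (m-2)
      · -- interior deletion: matched by A's combine term at i = l
        have hbd : pvS arr (l+1) j ≤ pvBd arr (m-1) ((m-1) - (l+1)) := by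
          have := pvBd_ub arr (m-1) ((m-1) - (l+1)) j (by omega) (by omega) (by omega)
          rwa [show m - 1 - (m - 1 - (l+1)) = l + 1 by omega] at this
        rw [he]
        exact le_trans (add_le_add_right hbd _)
          (pvCf_ge_term arr (m-1) (m-2) l hl1 (by omega))

-- port evaluations ----------------------------------------------------------
theorem pv_getD_set_self (L : List Int) (j : Nat) (v : Int) (h : j < L.length) :
    (L.set j v).getD j 0 = v := by
  simp [List.getD_eq_getElem?_getD, h]

theorem pv_getD_set_ne (L : List Int) (j k : Nat) (v : Int) (h : k ≠ j) :
    (L.set j v).getD k 0 = L.getD k 0 := by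
  rw [List.getD_eq_getElem?_getD, List.getElem?_set_ne (by omega), ← List.getD_eq_getElem?_getD]

-- A's forward pass: cur_max / max_so_far / fw after processing i = 1..j-1
theorem A_fwd (arr : List Int) (m : Nat) (L0 : List Int) (hL0 : L0.length = m)
    (h0 : L0.getD 0 0 = pvA arr 0) :
    ∀ j : Nat, 1 ≤ j → j ≤ m →
    ∃ L', (PySem.List.pyRange 1 (j : Int) 1).foldl
        (fun (s : Int × Int × List Int) i =>
          let x := PySem.List.pyGetD arr i 0
          let cur := max x (s.1 + x)
          (cur, max s.2.1 cur, PySem.List.pySetD s.2.2 i cur))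
        (pvA arr 0, pvA arr 0, L0)
      = (pvE arr (j - 1), pvF arr (j - 1), L')
      ∧ L'.length = m ∧ (∀ k, k < j → L'.getD k 0 = pvE arr k) := by
  intro j
  induction j with
  | zero => omega
  | succ j ih =>
    intro _ hjm
    cases j with
    | zero =>
      refine ⟨L0, ?_, hL0, ?_⟩
      · rw [show ((1 : Nat) : Int) = 1 by norm_num, PySem.List.pyRange_one_eq_nil (by omega)]
        rfl
      · intro k hk
        have : k = 0 := by omega
        subst this; exact h0
    | succ p =>
      obtain ⟨L', hfold, hlen, hinv⟩ := ih (by omega) (by omega)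
      set j := p + 1 with hj
      refine ⟨L'.set j (pvE arr j), ?_, by rw [List.length_set]; exact hlen, ?_⟩
      · rw [show ((j + 1 : Nat) : Int) = (j : Int) + 1 by push_cast; ring,
            PySem.List.pyRange_one_succ_right (by omega), List.foldl_append, hfold]
        simp only [List.foldl_cons, List.foldl_nil]
        have hx : PySem.List.pyGetD arr (j : Int) 0 = pvA arr j := by
          rw [PySem.List.pyGetD_natCast]; rfl
        have hset : PySem.List.pySetD L' (j : Int) (max (pvA arr j) (pvE arr (j-1) + pvA arr j))
            = L'.set j (pvE arr j) := by
          rw [PySem.List.pySetD_natCast, hj]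
          simp [pvE]
        rw [hx]
        show (max (pvA arr j) (pvE arr (j-1) + pvA arr j),
              max (pvF arr (j-1)) (max (pvA arr j) (pvE arr (j-1) + pvA arr j)),
              PySem.List.pySetD L' (j : Int) (max (pvA arr j) (pvE arr (j-1) + pvA arr j)))
            = (pvE arr (j + 1 - 1), pvF arr (j + 1 - 1), L'.set j (pvE arr j))
        rw [hset]
        refine Prod.ext ?_ (Prod.ext ?_ rfl)
        · show max (pvA arr (p+1)) (pvE arr p + pvA arr (p+1)) = pvE arr (p+1); rfl
        · show max (pvF arr p) (max (pvA arr (p+1)) (pvE arr p + pvA arr (p+1))) = pvF arr (p+1)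
          show max (pvF arr p) (pvE arr (p+1)) = pvF arr (p+1); rfl
      · intro k hk
        by_cases hkj : k = j
        · rw [hkj]; exact pv_getD_set_self L' j (pvE arr j) (by omega)
        · rw [pv_getD_set_ne L' j k _ hkj]; exact hinv k (by omega)

-- A's backward pass: cur_max / max_so_far / bw after processing i = n-2 .. down
theorem A_bwd (arr : List Int) (m : Nat) (hm : 1 ≤ m) :
    ∀ r : Nat, ∀ j : Nat, j + r = m - 1 → ∀ c : Int, c = (m : Int) - 2 - (j : Int) →
    ∀ L : List Int, L.length = m →
    (∀ k, m - 1 - j ≤ k → k < m → L.getD k 0 = pvBd arr (m-1) (m-1-k)) →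
    ∃ L', (PySem.List.pyRange c (-1) (-1)).foldl
        (fun (s : Int × Int × List Int) i =>
          let x := PySem.List.pyGetD arr i 0
          let cur := max x (s.1 + x)
          (cur, max s.2.1 cur, PySem.List.pySetD s.2.2 i cur))
        (pvBd arr (m-1) j, pvGd arr (m-1) j, L)
      = (pvBd arr (m-1) (m-1), pvGd arr (m-1) (m-1), L')
      ∧ L'.length = m ∧ (∀ k, k < m → L'.getD k 0 = pvBd arr (m-1) (m-1-k)) := by
  intro r
  induction r with
  | zero =>
    intro j hjr c hc L hL hinv
    have hj : j = m - 1 := by omega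
    refine ⟨L, ?_, hL, ?_⟩
    · rw [show c = -1 by omega, PySem.List.pyRange_neg_one_eq_nil (by omega), hj]
      rfl
    · intro k hk
      exact hinv k (by omega) hk
  | succ r ih =>
    intro j hjr c hc L hL hinv
    have hcp : c = ((m - 2 - j : Nat) : Int) := by omega
    set cN : Nat := m - 2 - j with hcN
    rw [hcp, PySem.List.pyRange_neg_one_cons (by omega)]
    simp only [List.foldl_cons]
    have hx : PySem.List.pyGetD arr (cN : Int) 0 = pvA arr cN := by
      rw [PySem.List.pyGetD_natCast]; rfl
    have hBd : max (pvA arr cN) (pvBd arr (m-1) j + pvA arr cN) = pvBd arr (m-1) (j+1) := by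
      show _ = max (pvA arr ((m-1) - (j+1))) (pvBd arr (m-1) j + pvA arr ((m-1) - (j+1)))
      rw [show (m-1) - (j+1) = cN by omega]
    have hGd : max (pvGd arr (m-1) j) (pvBd arr (m-1) (j+1)) = pvGd arr (m-1) (j+1) := rfl
    have hset : PySem.List.pySetD L (cN : Int) (pvBd arr (m-1) (j+1))
        = L.set cN (pvBd arr (m-1) (j+1)) := by rw [PySem.List.pySetD_natCast]
    rw [hx, hBd, hset]
    have hinv' : ∀ k, m - 1 - (j+1) ≤ k → k < m →
        (L.set cN (pvBd arr (m-1) (j+1))).getD k 0 = pvBd arr (m-1) (m-1-k) := by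
      intro k hk1 hk2
      by_cases hkc : k = cN
      · rw [hkc, pv_getD_set_self L cN _ (by omega), show m - 1 - cN = j + 1 by omega]
      · rw [pv_getD_set_ne L cN k _ hkc]
        exact hinv k (by omega) hk2
    have := ih (j+1) (by omega) ((cN : Int) - 1) (by omega)
      (L.set cN (pvBd arr (m-1) (j+1))) (by rw [List.length_set]; exact hL) hinv'
    obtain ⟨L', hfold, hlen, hfin⟩ := this
    exact ⟨L', by rw [hGd, hfold], hlen, hfin⟩

-- A's combine pass: fans after i = 1..t
theorem A_cmb (arr : List Int) (m : Nat) (Lf Lb : List Int)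
    (hLf : ∀ k, k < m → Lf.getD k 0 = pvE arr k)
    (hLb : ∀ k, k < m → Lb.getD k 0 = pvBd arr (m-1) (m-1-k)) :
    ∀ t : Nat, t + 2 ≤ m →
    (PySem.List.pyRange 1 ((t : Int) + 1) 1).foldl
      (fun fans i => max fans (PySem.List.pyGetD Lf (i - 1) 0 + PySem.List.pyGetD Lb (i + 1) 0))
      (pvGd arr (m-1) (m-1))
    = pvCf arr (m-1) t := by
  intro t
  induction t with
  | zero =>
    intro _
    rw [show ((0 : Nat) : Int) + 1 = 1 by norm_num, PySem.List.pyRange_one_eq_nil (by omega)]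
    rfl
  | succ t ih =>
    intro hm2
    rw [show ((t + 1 : Nat) : Int) + 1 = ((t : Int) + 1) + 1 by push_cast; ring,
        PySem.List.pyRange_one_succ_right (by omega), List.foldl_append, ih (by omega)]
    simp only [List.foldl_cons, List.foldl_nil]
    have hgf : PySem.List.pyGetD Lf ((t : Int) + 1 - 1) 0 = pvE arr t := by
      rw [show (t : Int) + 1 - 1 = ((t : Nat) : Int) by ring, PySem.List.pyGetD_natCast]
      exact hLf t (by omega)
    have hgb : PySem.List.pyGetD Lb ((t : Int) + 1 + 1) 0 = pvBd arr (m-1) ((m-1) - (t+2)) := by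
      rw [show (t : Int) + 1 + 1 = ((t + 2 : Nat) : Int) by push_cast; ring,
          PySem.List.pyGetD_natCast]
      rw [show Lb.getD (t+2) 0 = pvBd arr (m-1) (m-1-(t+2)) from hLb (t+2) (by omega)]
    rw [hgf, hgb]
    rfl

theorem A_eval (arr : List Int) (n : Int) (h1 : 1 ≤ n) (h2 : n ≤ arr.length) :
    maxSumSubarrayRemovingOneEle arr n = pvCf arr (n.toNat - 1) (n.toNat - 2) := by
  obtain ⟨m, hm, hn⟩ : ∃ m : Nat, 1 ≤ m ∧ n = (m : Int) := ⟨n.toNat, by omega, by omega⟩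
  subst hn
  have hmlen : m ≤ arr.length := by exact_mod_cast h2
  rw [show ((m : Int).toNat - 1) = m - 1 by simp, show ((m : Int).toNat - 2) = m - 2 by simp]
  unfold maxSumSubarrayRemovingOneEle
  -- initial fw list
  have ha0 : PySem.List.pyGetD arr 0 0 = pvA arr 0 := by
    rw [PySem.List.pyGetD_zero]; rfl
  have hInitLen : ((PySem.List.pyRange 0 (m : Int) 1).map (fun _ => (0 : Int))).length = m := by
    rw [List.length_map, PySem.List.length_pyRange_one]; simp
  have hfw0set : PySem.List.pySetD ((PySem.List.pyRange 0 (m : Int) 1).map (fun _ => (0 : Int)))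
      0 (pvA arr 0)
      = ((PySem.List.pyRange 0 (m : Int) 1).map (fun _ => (0 : Int))).set 0 (pvA arr 0) := by
    rw [show (0 : Int) = ((0 : Nat) : Int) by norm_num, PySem.List.pySetD_natCast]
  obtain ⟨Lf, hffold, hflen, hfinv⟩ :=
    A_fwd arr m (((PySem.List.pyRange 0 (m : Int) 1).map (fun _ => (0 : Int))).set 0 (pvA arr 0))
      (by rw [List.length_set]; exact hInitLen)
      (pv_getD_set_self _ 0 _ (by omega)) m hm (le_refl m)
  -- arr[n-1]
  have han : PySem.List.pyGetD arr ((m : Int) - 1) 0 = pvA arr (m - 1) := by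
    rw [show (m : Int) - 1 = ((m - 1 : Nat) : Int) by omega, PySem.List.pyGetD_natCast]; rfl
  have hbw0set : PySem.List.pySetD ((PySem.List.pyRange 0 (m : Int) 1).map (fun _ => (0 : Int)))
      ((m : Int) - 1) (pvA arr (m - 1))
      = ((PySem.List.pyRange 0 (m : Int) 1).map (fun _ => (0 : Int))).set (m - 1) (pvA arr (m - 1)) := by
    rw [show (m : Int) - 1 = ((m - 1 : Nat) : Int) by omega, PySem.List.pySetD_natCast]
  obtain ⟨Lb, hbfold, hblen, hbinv⟩ :=
    A_bwd arr m hm (m - 1) 0 (by omega) ((m : Int) - 2) (by omega)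
      (((PySem.List.pyRange 0 (m : Int) 1).map (fun _ => (0 : Int))).set (m - 1) (pvA arr (m - 1)))
      (by rw [List.length_set]; exact hInitLen)
      (by
        intro k hk1 hk2
        have hkm : k = m - 1 := by omega
        subst hkm
        rw [pv_getD_set_self _ _ _ (by omega), show m - 1 - (m - 1) = 0 by omega]
        rfl)
  simp only [show pvBd arr (m-1) 0 = pvA arr (m-1) from rfl,
    show pvGd arr (m-1) 0 = pvA arr (m-1) from rfl] at hbfold
  simp only [ha0, hfw0set, han, hbw0set, hffold, hbfold]
  -- the combine pass
  by_cases hm1 : m = 1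
  · subst hm1
    rw [show ((1 : Nat) : Int) - 1 = 0 by norm_num, PySem.List.pyRange_one_eq_nil (by omega)]
    rfl
  · rw [show (m : Int) - 1 = ((m - 2 : Nat) : Int) + 1 by omega]
    exact A_cmb arr m Lf Lb hfinv hbinv (m - 2) (by omega)

theorem B_inv (arr : List Int) (p : Nat) :
    (PySem.List.pyRange 1 ((p : Int) + 1) 1).foldl
      (fun (s : Int × Option Int × Int) i =>
        let x := PySem.List.pyGetD arr i 0
        let wd := match s.2.1 with
          | none => s.1
          | some w => max s.1 (w + x)
        let nd := max x (s.1 + x)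
        (nd, some wd, max (max s.2.2 nd) wd))
      (pvA arr 0, (none : Option Int), pvA arr 0)
    = (pvE arr p, (if p = 0 then (none : Option Int) else some (pvW arr p)), pvAns arr p) := by
  induction p with
  | zero =>
    rw [show ((0 : Nat) : Int) + 1 = 1 by norm_num, PySem.List.pyRange_one_eq_nil (by omega)]
    simp [pvE, pvAns]
  | succ p ih =>
    rw [show ((p + 1 : Nat) : Int) + 1 = ((p : Int) + 1) + 1 by push_cast; ring,
        PySem.List.pyRange_one_succ_right (by omega), List.foldl_append, ih]
    simp only [List.foldl_cons, List.foldl_nil]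
    have hx : PySem.List.pyGetD arr ((p : Int) + 1) 0 = pvA arr (p + 1) := by
      rw [show (p : Int) + 1 = ((p + 1 : Nat) : Int) by push_cast; ring,
          PySem.List.pyGetD_natCast]
      rfl
    cases p with
    | zero =>
      simp only [hx]
      refine Prod.ext rfl (Prod.ext ?_ ?_) <;> simp [pvE, pvW, pvAns]
    | succ q =>
      simp only [hx, if_neg (Nat.succ_ne_zero q)]
      refine Prod.ext rfl (Prod.ext ?_ ?_)
      · show some (max (pvE arr (q+1)) (pvW arr (q+1) + pvA arr (q+2))) = _
        rw [if_neg (Nat.succ_ne_zero (q+1))]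
        rfl
      · rfl

theorem B_eval (arr : List Int) (n : Int) (h1 : 1 ≤ n) (h2 : n ≤ arr.length) :
    maxSumSubarrayRemovingOneEle_alt arr n = pvAns arr (n.toNat - 1) := by
  have key : ∀ p : Nat, maxSumSubarrayRemovingOneEle_alt arr ((p : Int) + 1) = pvAns arr p := by
    intro p
    unfold maxSumSubarrayRemovingOneEle_alt
    simp only [PySem.List.pyGetD_zero]
    rw [show arr.getD 0 0 = pvA arr 0 from rfl, B_inv arr p]
  have hn : n = ((n.toNat - 1 : Nat) : Int) + 1 := by omega
  conv_lhs => rw [hn]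
  rw [key]

-- ===== VERDICT (by name: the statement is the Claim_ definition above) =====
theorem maxSumSubarrayRemovingOneEle_spec : Claim_equal_maxSumSubarrayRemovingOneEle := by
  intro arr n _ hpre
  obtain ⟨h1, h2⟩ := hpre
  unfold Spec_maxSumSubarrayRemovingOneEle
  rw [A_eval arr n h1 h2, B_eval arr n h1 h2,
    pvCf_eq_Ans arr n.toNat (by omega)]
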